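-- pv_equiv track=rewrite | github.com/kapildevadk/gearthview3 | ext-libs/twisted/spread/banana.py | b1282int
-- ===== SOURCE A (Python) =====
-- def b1282int(st: str) -> int:
--     """
--     Convert an integer represented as a base 128 string into an C{int} or
--     C{long}.
--
--     @param st: The integer encoded in a string.
--     @type st: C{str}
--
--     @return: The integer value extracted from the string.
--     @rtype: C{int} or C{long}
--     """
--     e = 1
--     i = 0
--     for char in st:
--         n = ord(char)
--         i += (n * e)
--         e <<= 7
--     return i
-- ===== SOURCE B (Python) =====
-- def b1282int(st: str) -> int:
--     i = 0
--     for char in reversed(st):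
--         i = i * 128 + ord(char)
--     return i
-- ===== Notes on version B (the rewrite author's own statement) =====
-- stated objective: idiomatic
-- what changed: Replaces the little-endian loop that maintains an explicit power-of-128 weight accumulator with Horner's method over the reversed string (i = i*128 + ord(c)), maintaining only the result.
import Mathlib
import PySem

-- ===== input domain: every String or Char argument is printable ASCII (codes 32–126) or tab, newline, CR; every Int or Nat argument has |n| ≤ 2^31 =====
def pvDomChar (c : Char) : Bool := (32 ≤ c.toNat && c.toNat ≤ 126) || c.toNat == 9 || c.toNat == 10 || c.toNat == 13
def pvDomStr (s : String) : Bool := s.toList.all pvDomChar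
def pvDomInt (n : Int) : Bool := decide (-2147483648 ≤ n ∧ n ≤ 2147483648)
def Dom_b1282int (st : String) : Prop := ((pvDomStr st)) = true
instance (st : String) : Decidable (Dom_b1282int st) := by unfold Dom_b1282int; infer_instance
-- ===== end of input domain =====

-- B decodes by Horner's method over the reversed string (idiomatic decomposition; no weight accumulator); same value on all inputs.
-- ===== PORT A =====
def b1282int (st : String) : Int :=
  (st.toList.foldl (fun (s : Int × Int) char =>
      let n : Int := (char.toNat : Int)
      (s.1 <<< (7:Nat), s.2 + n * s.1)) (1, 0)).2

-- ===== PORT B =====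
def b1282int_alt (st : String) : Int :=
  st.toList.reverse.foldl (fun (i : Int) char => i * 128 + (char.toNat : Int)) 0

-- ===== PRECONDITION & SPEC =====
def Spec_b1282int (st : String) (out : Int) : Prop := out = b1282int_alt st
instance (st : String) (out : Int) : Decidable (Spec_b1282int st out) := by unfold Spec_b1282int; infer_instance

-- ===== CLAIM (what is proved, stated in full; the proofs are below) =====
def Claim_equal_b1282int : Prop := ∀ (st : String), Dom_b1282int st → Spec_b1282int st (b1282int st)

-- ===== LEMMAS AND PROOFS =====

-- ===== VERDICT (by name: the statement is the Claim_ definition above) =====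
theorem b1282int_key (l : List Char) (e i : Int) :
    (l.foldl (fun (s : Int × Int) char =>
        let n : Int := (char.toNat : Int)
        (s.1 <<< (7:Nat), s.2 + n * s.1)) (e, i)).2
      = i + e * l.foldr (fun char acc => acc * 128 + (char.toNat : Int)) 0 := by
  induction l generalizing e i with
  | nil => simp
  | cons c t ih =>
    simp only [List.foldl, List.foldr, ih]
    have h : e <<< (7:Nat) = e * 128 := by
      rw [Int.shiftLeft_eq]; norm_num
    rw [h]; ring

theorem b1282int_spec : Claim_equal_b1282int := by
  intro st _
  unfold Spec_b1282int b1282int b1282int_alt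
  rw [List.foldl_reverse, b1282int_key]
  ring
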